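-- pv_equiv track=rewrite | github.com/every-algorithm/python | graphics/visvalingamwhyatt_algorithm.py | visvalingam_simplify
-- ===== SOURCE A (Python) =====
-- def visvalingam_simplify(points, target_len):
--     # Make a copy of the points to avoid modifying the original list
--     pts = points[:]
--     # Repeat until the desired number of points is reached
--     while len(pts) > target_len:
--         min_area = None
--         min_index = None
--         # Compute area for each interior point
--         for i in range(1, len(pts) - 1):
--             x1, y1 = pts[i - 1]
--             x2, y2 = pts[i]
--             x3, y3 = pts[i + 1]
--             # Calculate the area of the triangle formed by the three points
--             area = abs(x1 * (y2 - y3) + x2 * (y3 - y1) + x3 * (y1 - y2)) // 2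
--             # Find the point with the smallest area
--             if (min_area is None) or (area < min_area):
--                 min_area = area
--                 min_index = i
--         # Remove the point with the smallest area
--         pts.pop(min_index)
--     return pts
-- ===== SOURCE B (Python) =====
-- def _tri_area(pts, i):
--     (x1, y1), (x2, y2), (x3, y3) = pts[i - 1], pts[i], pts[i + 1]
--     return abs(x1 * (y2 - y3) + x2 * (y3 - y1) + x3 * (y1 - y2)) // 2
--
--
-- def visvalingam_simplify(points, target_len):
--     pts = list(points)
--     # areas[j] is the triangle area of interior point j+1; maintained incrementally.
--     areas = [_tri_area(pts, i) for i in range(1, len(pts) - 1)]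
--     while len(pts) > target_len:
--         j = areas.index(min(areas))
--         pts.pop(j + 1)
--         areas.pop(j)
--         if j > 0:
--             areas[j - 1] = _tri_area(pts, j)
--         if j < len(areas):
--             areas[j] = _tri_area(pts, j + 1)
--     return pts
-- ===== Notes on version B (the rewrite author's own statement) =====
-- stated objective: alternative
-- what changed: B maintains the list of interior triangle areas incrementally across removals (pop the removed entry, recompute only the two neighbouring areas) and selects the minimum with min()/index(), instead of A's recomputation of every interior area with a hand-written running-minimum loop on each iteration.
import Mathlib
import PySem

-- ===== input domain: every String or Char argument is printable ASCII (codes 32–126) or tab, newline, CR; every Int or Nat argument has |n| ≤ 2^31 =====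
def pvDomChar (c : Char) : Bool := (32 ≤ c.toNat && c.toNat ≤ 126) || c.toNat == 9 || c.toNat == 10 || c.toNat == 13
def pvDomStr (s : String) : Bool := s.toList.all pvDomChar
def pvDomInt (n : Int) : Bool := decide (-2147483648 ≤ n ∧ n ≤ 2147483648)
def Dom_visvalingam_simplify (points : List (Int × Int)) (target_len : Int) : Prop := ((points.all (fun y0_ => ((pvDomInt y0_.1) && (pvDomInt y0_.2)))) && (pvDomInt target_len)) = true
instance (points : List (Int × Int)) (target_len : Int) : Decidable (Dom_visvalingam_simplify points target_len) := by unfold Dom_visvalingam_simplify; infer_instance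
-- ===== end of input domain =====

-- B maintains the interior triangle areas incrementally (recomputing only the two neighbours of
-- each removed point) and picks the minimum by min()/index(), instead of A's full recomputation
-- of all interior areas with a hand-written running-minimum loop per removal.

-- ===== PORT A =====
-- area of the triangle at interior index i (A computes this inline in the for-loop body);
-- the pyGetD default is never read: A only evaluates it at in-range indices 1 ≤ i ≤ len-2.
def pvAreaA (pts : List (Int × Int)) (i : Int) : Int :=
  let p1 := PySem.List.pyGetD pts (i - 1) ((0 : Int), (0 : Int))
  let p2 := PySem.List.pyGetD pts i ((0 : Int), (0 : Int))
  let p3 := PySem.List.pyGetD pts (i + 1) ((0 : Int), (0 : Int))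
  PySem.Int.floordiv |p1.1 * (p2.2 - p3.2) + p2.1 * (p3.2 - p1.2) + p3.1 * (p1.2 - p2.2)| 2

def pvLoopA : Nat → List (Int × Int) → Int → List (Int × Int)
  | 0, pts, _ => pts
  | fuel + 1, pts, target =>
    if (pts.length : Int) > target then
      let st := (PySem.List.pyRange 1 ((pts.length : Int) - 1) 1).foldl
        (fun (st : Option Int × Option Int) i =>
          let area := pvAreaA pts i
          match st.1 with
          | none => (some area, some i)
          | some m => if area < m then (some area, some i) else st)
        (none, none)
      match st.2 with
      | none => pts          -- min_index is None: Python raises TypeError in pts.pop(None); outside Pre_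
      | some i =>
        match PySem.List.pop? pts i with
        | none => pts        -- unreachable: min_index is an in-range interior index
        | some (_, rest) => pvLoopA fuel rest target
    else pts

def visvalingam_simplify (points : List (Int × Int)) (target_len : Int) : List (Int × Int) :=
  pvLoopA (points.length + 1) points target_len

-- ===== PORT B =====
def pvTriArea (pts : List (Int × Int)) (i : Int) : Int :=
  let p1 := PySem.List.pyGetD pts (i - 1) ((0 : Int), (0 : Int))
  let p2 := PySem.List.pyGetD pts i ((0 : Int), (0 : Int))
  let p3 := PySem.List.pyGetD pts (i + 1) ((0 : Int), (0 : Int))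
  PySem.Int.floordiv |p1.1 * (p2.2 - p3.2) + p2.1 * (p3.2 - p1.2) + p3.1 * (p1.2 - p2.2)| 2

-- [_tri_area(pts, i) for i in range(1, len(pts) - 1)]
def pvInitAreas (pts : List (Int × Int)) : List Int :=
  (PySem.List.pyRange 1 ((pts.length : Int) - 1) 1).map (fun i => pvTriArea pts i)

def pvLoopB : Nat → List (Int × Int) → List Int → Int → List (Int × Int)
  | 0, pts, _, _ => pts
  | fuel + 1, pts, areas, target =>
    if (pts.length : Int) > target then
      match PySem.List.min? areas (fun x => x) with
      | none => pts          -- min([]): Python raises ValueError; outside Pre_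
      | some m =>
        match PySem.List.index? areas m with
        | none => pts        -- unreachable: the minimum is a member
        | some j =>
          match PySem.List.pop? pts ((j : Int) + 1), PySem.List.pop? areas (j : Int) with
          | some (_, pts'), some (_, ar) =>
            let ar1 := if 0 < j then ar.set (j - 1) (pvTriArea pts' (j : Int)) else ar
            let ar2 := if j < ar.length then ar1.set j (pvTriArea pts' ((j : Int) + 1)) else ar1
            pvLoopB fuel pts' ar2 target
          | _, _ => pts      -- unreachable: both indices are in range
    else pts

def visvalingam_simplify_alt (points : List (Int × Int)) (target_len : Int) : List (Int × Int) :=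
  pvLoopB (points.length + 1) points (pvInitAreas points) target_len

-- ===== PRECONDITION & SPEC =====
-- Pre_ excludes exactly the inputs where A raises: when target_len < 2 and len(points) > target_len
-- the simplification reaches a list with no interior point while still too long, and A executes
-- pts.pop(None) (TypeError); B raises there too (min of an empty list).
def Pre_visvalingam_simplify (points : List (Int × Int)) (target_len : Int) : Prop :=
  2 ≤ target_len ∨ (points.length : Int) ≤ target_len
instance (points : List (Int × Int)) (target_len : Int) : Decidable (Pre_visvalingam_simplify points target_len) := by unfold Pre_visvalingam_simplify; infer_instance

def pvWitness_visvalingam_simplify : (List (Int × Int)) × Int := ([(0, 0), (1, 5), (2, 0), (3, 1)], 2)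

def Spec_visvalingam_simplify (points : List (Int × Int)) (target_len : Int) (out : List (Int × Int)) : Prop := out = visvalingam_simplify_alt points target_len
instance (points : List (Int × Int)) (target_len : Int) (out : List (Int × Int)) : Decidable (Spec_visvalingam_simplify points target_len out) := by unfold Spec_visvalingam_simplify; infer_instance

-- ===== CLAIM (what is proved, stated in full; the proofs are below) =====
def Claim_equal_visvalingam_simplify : Prop := ∀ (points : List (Int × Int)) (target_len : Int), Dom_visvalingam_simplify points target_len → Pre_visvalingam_simplify points target_len → Spec_visvalingam_simplify points target_len (visvalingam_simplify points target_len)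

-- ===== LEMMAS AND PROOFS =====

-- the two area helpers are syntactically the same formula
theorem pvAreaA_eq_pvTriArea : pvAreaA = pvTriArea := rfl

def pvSelSpec : List (Int × Int) → Option (Int × Int)
  | [] => none
  | (a, i) :: rest =>
    match pvSelSpec rest with
    | none => some (a, i)
    | some (m, q) => if m < a then some (m, q) else some (a, i)
def pvSelStep (st : Option Int × Option Int) (pr : Int × Int) : Option Int × Option Int :=
  match st.1 with
  | none => (some pr.1, some pr.2)
  | some m => if pr.1 < m then (some pr.1, some pr.2) else st
def pvPairs : List Int → Int → List (Int × Int)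
  | [], _ => []
  | a :: t, s => (a, s) :: pvPairs t (s + 1)

theorem pvSelStep_foldl_aux (l : List (Int × Int)) : ∀ (c p : Int),
    l.foldl pvSelStep (some c, some p) =
      match pvSelSpec l with
      | none => (some c, some p)
      | some (m, q) => if m < c then (some m, some q) else (some c, some p) := by
  induction l with
  | nil => intro c p; simp [pvSelSpec]
  | cons hd tl ih =>
    obtain ⟨a, i⟩ := hd
    intro c p
    simp only [List.foldl_cons, pvSelSpec, pvSelStep]
    by_cases hac : a < c
    · simp only [if_pos hac, ih]
      cases h : pvSelSpec tl with
      | none => simp [if_pos hac]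
      | some mq =>
        obtain ⟨m, q⟩ := mq
        by_cases hma : m < a
        · simp [if_pos hma, if_pos (lt_trans hma hac)]
        · simp [if_neg hma, if_pos hac]
    · simp only [if_neg hac, ih]
      cases h : pvSelSpec tl with
      | none => simp [if_neg hac]
      | some mq =>
        obtain ⟨m, q⟩ := mq
        by_cases hma : m < a
        · simp [if_pos hma]
        · have : ¬ m < c := by omega
          simp [if_neg hma, if_neg hac, if_neg this]

theorem pvSelStep_foldl (l : List (Int × Int)) :
    l.foldl pvSelStep (none, none) =
      match pvSelSpec l with
      | none => ((none : Option Int), (none : Option Int))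
      | some (m, q) => (some m, some q) := by
  cases l with
  | nil => simp [pvSelSpec]
  | cons hd tl =>
    obtain ⟨a, i⟩ := hd
    simp only [List.foldl_cons, pvSelStep, pvSelSpec, pvSelStep_foldl_aux]
    cases h : pvSelSpec tl with
    | none => simp
    | some mq =>
      obtain ⟨m, q⟩ := mq
      by_cases hma : m < a
      · simp [if_pos hma]
      · simp [if_neg hma]

theorem pvFoldlMinComm (t : List Int) : ∀ (a b : Int), t.foldl min (min a b) = min a (t.foldl min b) := by
  induction t with
  | nil => intro a b; simp
  | cons c t ih =>
    intro a b
    simp only [List.foldl_cons]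
    rw [min_assoc, ih]

theorem pvBSel (v : List Int) : ∀ (s : Int), v ≠ [] →
    ∃ (m : Int) (j : Nat), PySem.List.min? v (fun x => x) = some m ∧
      PySem.List.index? v m = some j ∧
      pvSelSpec (pvPairs v s) = some (m, s + (j : Int)) := by
  induction v with
  | nil => intro s h; exact absurd rfl h
  | cons a t ih =>
    intro s _
    cases t with
    | nil =>
      refine ⟨a, 0, ?_, ?_, ?_⟩
      · simp [PySem.List.min?_id_cons]
      · exact PySem.List.index?_cons_self _ _
      · simp [pvPairs, pvSelSpec]
    | cons b t' =>
      obtain ⟨m', j', hmin', hidx', hsel'⟩ := ih (s + 1) (by simp)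
      -- value of the running min on the cons list
      have hfold' : (b :: t').foldl min a = min a m' := by
        have h1 : PySem.List.min? (b :: t') (fun x => x) = some (t'.foldl min b) :=
          PySem.List.min?_id_cons b t'
        have h2 : m' = t'.foldl min b := by
          rw [hmin'] at h1; exact (Option.some_inj.mp h1)
        simp only [List.foldl_cons]
        rw [show min a b = min a b from rfl, pvFoldlMinComm, h2]
      have hminv : PySem.List.min? (a :: b :: t') (fun x => x) = some (min a m') := by
        rw [PySem.List.min?_id_cons, hfold']
      by_cases hm : m' < a
      · refine ⟨m', j' + 1, ?_, ?_, ?_⟩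
        · rw [hminv]; congr 1; omega
        · have hne : a ≠ m' := by omega
          rw [PySem.List.index?_cons_of_ne _ hne, hidx']; rfl
        · have hcons : pvSelSpec (pvPairs (a :: b :: t') s) =
              match pvSelSpec (pvPairs (b :: t') (s + 1)) with
              | none => some (a, s)
              | some (m, q) => if m < a then some (m, q) else some (a, s) := rfl
          rw [hcons, hsel']
          simp only [if_pos hm]
          congr 1
          push_cast
          ring_nf
      · refine ⟨a, 0, ?_, ?_, ?_⟩
        · rw [hminv]; congr 1; omega
        · exact PySem.List.index?_cons_self _ _
        · have hcons : pvSelSpec (pvPairs (a :: b :: t') s) =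
              match pvSelSpec (pvPairs (b :: t') (s + 1)) with
              | none => some (a, s)
              | some (m, q) => if m < a then some (m, q) else some (a, s) := rfl
          rw [hcons, hsel']
          simp only [if_neg hm]
          norm_num

theorem pvPairsRange (f : Int → Int) : ∀ (n : Nat) (a b : Int), (b - a).toNat = n →
    (PySem.List.pyRange a b 1).map (fun i => (f i, i)) =
      pvPairs ((PySem.List.pyRange a b 1).map f) a := by
  intro n
  induction n with
  | zero =>
    intro a b h
    rw [PySem.List.pyRange_one_eq_nil (by omega)]
    rfl
  | succ n ih =>
    intro a b h
    rw [PySem.List.pyRange_one_cons (by omega)]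
    simp only [List.map_cons, pvPairs]
    rw [ih (a + 1) b (by omega)]

theorem pvInitAreas_length (pts : List (Int × Int)) :
    (pvInitAreas pts).length = pts.length - 2 := by
  simp only [pvInitAreas, List.length_map, PySem.List.length_pyRange_one]
  omega

theorem pvInitAreas_getElem (pts : List (Int × Int)) (k : Nat) (hk : k < (pvInitAreas pts).length) :
    (pvInitAreas pts)[k] = pvTriArea pts (1 + (k : Int)) := by
  simp only [pvInitAreas, List.getElem_map]
  congr 1
  exact PySem.List.getElem_pyRange_one _ _ _ _

def pvTriOf (p q r : Int × Int) : Int :=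
  PySem.Int.floordiv |p.1 * (q.2 - r.2) + q.1 * (r.2 - p.2) + r.1 * (p.2 - q.2)| 2

theorem pvTriArea_nat (pts : List (Int × Int)) (i : Nat) (h1 : 1 ≤ i) (h2 : i + 1 < pts.length) :
    pvTriArea pts (i : Int) =
      pvTriOf (pts[i - 1]'(by omega)) (pts[i]'(by omega)) (pts[i + 1]'(by omega)) := by
  have e1 : PySem.List.pyGetD pts ((i : Int) - 1) ((0 : Int), (0 : Int)) = pts[i - 1]'(by omega) := by
    rw [PySem.List.pyGetD_eq_getElem pts _ (by omega) (by push_cast; omega)]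
    congr 1 <;> omega
  have e2 : PySem.List.pyGetD pts (i : Int) ((0 : Int), (0 : Int)) = pts[i]'(by omega) := by
    rw [PySem.List.pyGetD_eq_getElem pts _ (by omega) (by push_cast; omega)]
    congr 1 <;> omega
  have e3 : PySem.List.pyGetD pts ((i : Int) + 1) ((0 : Int), (0 : Int)) = pts[i + 1]'(by omega) := by
    rw [PySem.List.pyGetD_eq_getElem pts _ (by omega) (by push_cast; omega)]
    congr 1 <;> omega
  simp only [pvTriArea, e1, e2, e3, pvTriOf]

theorem pvTriErase_low (pts : List (Int × Int)) (r i : Nat) (h1 : 1 ≤ i) (hlt : i + 1 < r)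
    (hr : r < pts.length) :
    pvTriArea (pts.eraseIdx r) (i : Int) = pvTriArea pts (i : Int) := by
  have hel : (pts.eraseIdx r).length = pts.length - 1 := by
    rw [List.length_eraseIdx]; simp [hr]
  rw [pvTriArea_nat _ i h1 (by omega), pvTriArea_nat pts i h1 (by omega)]
  congr 1 <;> (rw [List.getElem_eraseIdx]; split) <;>
    first | rfl | (exfalso; omega) | (congr 1 <;> omega)

theorem pvTriErase_high (pts : List (Int × Int)) (r i : Nat) (h1 : 1 ≤ i) (hge : r + 1 ≤ i)
    (h2 : i + 1 < pts.length - 1) :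
    pvTriArea (pts.eraseIdx r) (i : Int) = pvTriArea pts ((i : Int) + 1) := by
  have hel : (pts.eraseIdx r).length = pts.length - 1 := by
    rw [List.length_eraseIdx]; simp only [if_pos (by omega : r < pts.length)]
  have hcast : ((i : Int) + 1) = ((i + 1 : Nat) : Int) := by push_cast; ring
  rw [pvTriArea_nat _ i h1 (by omega), hcast, pvTriArea_nat pts (i + 1) (by omega) (by omega)]
  congr 1 <;> (rw [List.getElem_eraseIdx]; split) <;>
    first | rfl | (exfalso; omega) | (congr 1 <;> omega)

theorem pvInitAreas_getElem? (pts : List (Int × Int)) (k : Nat) :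
    (pvInitAreas pts)[k]? =
      if k < pts.length - 2 then some (pvTriArea pts (1 + (k : Int))) else none := by
  by_cases h : k < pts.length - 2
  · rw [List.getElem?_eq_getElem (by rw [pvInitAreas_length]; omega),
      pvInitAreas_getElem _ k (by rw [pvInitAreas_length]; omega), if_pos h]
  · rw [List.getElem?_eq_none (by rw [pvInitAreas_length]; omega), if_neg h]


theorem pvStepAreas (pts : List (Int × Int)) (j : Nat) (h3 : 3 ≤ pts.length)
    (hj : j < pts.length - 2) :
    (if j < ((pvInitAreas pts).eraseIdx j).length then
      (if 0 < j then ((pvInitAreas pts).eraseIdx j).set (j - 1) (pvTriArea (pts.eraseIdx (j + 1)) (j : Int))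
        else (pvInitAreas pts).eraseIdx j).set j (pvTriArea (pts.eraseIdx (j + 1)) ((j : Int) + 1))
    else
      if 0 < j then ((pvInitAreas pts).eraseIdx j).set (j - 1) (pvTriArea (pts.eraseIdx (j + 1)) (j : Int))
      else (pvInitAreas pts).eraseIdx j) = pvInitAreas (pts.eraseIdx (j + 1)) := by
  set pts' := pts.eraseIdx (j + 1) with hpts'
  have hlen' : pts'.length = pts.length - 1 := by
    rw [hpts', List.length_eraseIdx, if_pos (by omega : j + 1 < pts.length)]
  set ar := (pvInitAreas pts).eraseIdx j with har
  have harlen : ar.length = pts.length - 3 := by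
    rw [har, List.length_eraseIdx, pvInitAreas_length, if_pos (by omega : j < pts.length - 2)]
    omega
  set v1 := pvTriArea pts' (j : Int) with hv1
  set v2 := pvTriArea pts' ((j : Int) + 1) with hv2
  set ar1 := if 0 < j then ar.set (j - 1) v1 else ar with har1
  have har1len : ar1.length = pts.length - 3 := by
    rw [har1]; split <;> simp [List.length_set, harlen]
  set ar2 := if j < ar.length then ar1.set j v2 else ar1 with har2
  have har2len : ar2.length = pts.length - 3 := by
    rw [har2]; split <;> simp [List.length_set, har1len]
  have harget : ∀ k : Nat, ar[k]? =
      if k < j then (if k < pts.length - 2 then some (pvTriArea pts (1 + (k : Int))) else none)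
      else (if k + 1 < pts.length - 2 then some (pvTriArea pts (1 + ((k + 1 : Nat) : Int))) else none) := by
    intro k
    rw [har, List.getElem?_eraseIdx]
    by_cases hk : k < j
    · rw [if_pos hk, if_pos hk, pvInitAreas_getElem?]
    · rw [if_neg hk, if_neg hk, pvInitAreas_getElem?]
  have har1get : ∀ k : Nat, ar1[k]? = if 0 < j ∧ k = j - 1 then some v1 else ar[k]? := by
    intro k
    rw [har1]
    by_cases hc1 : 0 < j
    · rw [if_pos hc1, List.getElem?_set]
      by_cases hk : j - 1 = k
      · rw [if_pos hk, if_pos (by rw [harlen]; omega), if_pos ⟨hc1, hk.symm⟩]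
      · rw [if_neg hk, if_neg (by omega : ¬ (0 < j ∧ k = j - 1))]
    · rw [if_neg hc1, if_neg (by omega : ¬ (0 < j ∧ k = j - 1))]
  have har2get : ∀ k : Nat, ar2[k]? = if j < pts.length - 3 ∧ k = j then some v2 else ar1[k]? := by
    intro k
    rw [har2, harlen]
    by_cases hc2 : j < pts.length - 3
    · rw [if_pos hc2, List.getElem?_set]
      by_cases hk : j = k
      · rw [if_pos hk, if_pos (by rw [har1len]; omega), if_pos ⟨hc2, hk.symm⟩]
      · rw [if_neg hk, if_neg (by omega : ¬ (j < pts.length - 3 ∧ k = j))]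
    · rw [if_neg hc2, if_neg (by omega : ¬ (j < pts.length - 3 ∧ k = j))]
  apply List.ext_getElem?
  intro k
  rw [pvInitAreas_getElem? pts' k, hlen', har2get, har1get, harget]
  by_cases hA : j < pts.length - 3 ∧ k = j
  · rw [if_pos hA, if_pos (by omega : k < pts.length - 1 - 2), hv2]
    exact congrArg some (by rw [show (j : Int) + 1 = 1 + (k : Int) by omega])
  · rw [if_neg hA]
    by_cases hB : 0 < j ∧ k = j - 1
    · rw [if_pos hB, if_pos (by omega : k < pts.length - 1 - 2), hv1]
      exact congrArg some (by rw [show (j : Int) = 1 + (k : Int) by omega])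
    · rw [if_neg hB]
      by_cases hk : k < j
      · rw [if_pos hk, if_pos (by omega : k < pts.length - 2),
          if_pos (by omega : k < pts.length - 1 - 2), hpts']
        refine congrArg some ?_
        rw [show (1 : Int) + (k : Int) = ((k + 1 : Nat) : Int) by push_cast; ring]
        exact (pvTriErase_low pts (j + 1) (k + 1) (by omega) (by omega) (by omega)).symm
      · rw [if_neg hk]
        by_cases hk2 : k + 1 < pts.length - 2
        · rw [if_pos hk2, if_pos (by omega : k < pts.length - 1 - 2), hpts']
          refine congrArg some ?_
          rw [show (1 : Int) + ((k + 1 : Nat) : Int) = ((k + 1 : Nat) : Int) + 1 by push_cast; ring,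
            show (1 : Int) + (k : Int) = ((k + 1 : Nat) : Int) by push_cast; ring]
          exact (pvTriErase_high pts (j + 1) (k + 1) (by omega) (by omega) (by omega)).symm
        · rw [if_neg hk2, if_neg (by omega : ¬ k < pts.length - 1 - 2)]

theorem pvMain (fuel : Nat) : ∀ (pts : List (Int × Int)) (target : Int),
    (2 ≤ target ∨ (pts.length : Int) ≤ target) →
    pvLoopA fuel pts target = pvLoopB fuel pts (pvInitAreas pts) target := by
  induction fuel with
  | zero => intro pts target _; rfl
  | succ fuel ih =>
    intro pts target hpre
    by_cases hgt : (pts.length : Int) > target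
    · have ht2 : 2 ≤ target := by rcases hpre with h | h <;> omega
      have hlen3 : 3 ≤ pts.length := by omega
      have hne : pvInitAreas pts ≠ [] := by
        intro h
        have := congrArg List.length h
        rw [pvInitAreas_length] at this
        simp at this
        omega
      obtain ⟨m, j, hmin, hidx, hsel⟩ := pvBSel (pvInitAreas pts) 1 hne
      obtain ⟨hjlt, -, -⟩ := PySem.List.getElem_of_index?_eq_some hidx
      have hjlt2 : j < pts.length - 2 := by rw [pvInitAreas_length] at hjlt; omega
      have hpop1 : PySem.List.pop? pts (1 + (j : Int)) = some (pts[j + 1]'(by omega), pts.eraseIdx (j + 1)) := by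
        rw [show (1 : Int) + (j : Int) = ((j + 1 : Nat) : Int) by push_cast; ring]
        exact PySem.List.pop?_natCast pts (j + 1) (by omega)
      have hpop1' : PySem.List.pop? pts ((j : Int) + 1) = some (pts[j + 1]'(by omega), pts.eraseIdx (j + 1)) := by
        rw [show (j : Int) + 1 = 1 + (j : Int) by ring]
        exact hpop1
      have hpop2 : PySem.List.pop? (pvInitAreas pts) (j : Int) =
          some ((pvInitAreas pts)[j], (pvInitAreas pts).eraseIdx j) :=
        PySem.List.pop?_natCast _ j hjlt
      have hfold : (PySem.List.pyRange 1 ((pts.length : Int) - 1) 1).foldl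
          (fun (st : Option Int × Option Int) i =>
            let area := pvAreaA pts i
            match st.1 with
            | none => (some area, some i)
            | some m => if area < m then (some area, some i) else st)
          (none, none) = (some m, some (1 + (j : Int))) := by
        have hbody : (fun (st : Option Int × Option Int) i =>
            let area := pvAreaA pts i
            match st.1 with
            | none => (some area, some i)
            | some m => if area < m then (some area, some i) else st)
            = fun st i => pvSelStep st (pvAreaA pts i, i) := rfl
        rw [hbody, ← List.foldl_map (f := fun i => ((pvAreaA pts i, i) : Int × Int)) (g := pvSelStep),
          pvAreaA_eq_pvTriArea,
          pvPairsRange (fun i => pvTriArea pts i) (((pts.length : Int) - 1) - 1).toNat 1 _ rfl,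
          show (PySem.List.pyRange 1 ((pts.length : Int) - 1) 1).map (fun i => pvTriArea pts i)
            = pvInitAreas pts from rfl,
          pvSelStep_foldl, hsel]
      have hA : pvLoopA (fuel + 1) pts target = pvLoopA fuel (pts.eraseIdx (j + 1)) target := by
        simp only [pvLoopA, if_pos hgt, hfold, hpop1]
      have hB : pvLoopB (fuel + 1) pts (pvInitAreas pts) target
          = pvLoopB fuel (pts.eraseIdx (j + 1)) (pvInitAreas (pts.eraseIdx (j + 1))) target := by
        simp only [pvLoopB, if_pos hgt, hmin, hidx, hpop1', hpop2]
        rw [pvStepAreas pts j hlen3 hjlt2]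
      rw [hA, hB]
      exact ih (pts.eraseIdx (j + 1)) target (Or.inl ht2)
    · simp only [pvLoopA, pvLoopB, if_neg hgt]

-- ===== VERDICT (by name: the statement is the Claim_ definition above) =====
theorem visvalingam_simplify_spec : Claim_equal_visvalingam_simplify := by
  intro points target_len _ hpre
  unfold Spec_visvalingam_simplify visvalingam_simplify visvalingam_simplify_alt
  exact pvMain (points.length + 1) points target_len hpre
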